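-- pv_equiv track=rewrite | github.com/MichaelTroelsen/SIDM2conv | sidm2/disasm_table_finder.py | identify_table_type
-- ===== SOURCE A (Python) =====
-- from typing import Dict, List, Tuple, Set
--
-- def identify_table_type(addr: int, known_addresses: Dict[str, int]) -> str:
--     """Identify table type based on address proximity to known tables.
--
--     Args:
--         addr: Address to identify
--         known_addresses: Dict of known table addresses
--
--     Returns:
--         Table type name or "unknown"
--     """
--     # Check for exact match
--     for name, known_addr in known_addresses.items():
--         if addr == known_addr:
--             return name
--
--     # Check for proximity (within 16 bytes might be same table)
--     for name, known_addr in known_addresses.items():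
--         if abs(addr - known_addr) < 16:
--             return f"{name}_region"
--
--     return "unknown"
-- ===== SOURCE B (Python) =====
-- def identify_table_type(addr: int, known_addresses: dict) -> str:
--     """Single pass: return on exact match, remember the first proximity hit."""
--     candidate = None
--     for name, known_addr in known_addresses.items():
--         if addr == known_addr:
--             return name
--         if candidate is None and abs(addr - known_addr) < 16:
--             candidate = name
--     return f"{candidate}_region" if candidate is not None else "unknown"
-- ===== Notes on version B (the rewrite author's own statement) =====
-- stated objective: simpler
-- what changed: Replaces A's two sequential scans of the dict with one pass that returns on an exact match and records only the first proximity candidate for the fallback.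
import Mathlib
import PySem

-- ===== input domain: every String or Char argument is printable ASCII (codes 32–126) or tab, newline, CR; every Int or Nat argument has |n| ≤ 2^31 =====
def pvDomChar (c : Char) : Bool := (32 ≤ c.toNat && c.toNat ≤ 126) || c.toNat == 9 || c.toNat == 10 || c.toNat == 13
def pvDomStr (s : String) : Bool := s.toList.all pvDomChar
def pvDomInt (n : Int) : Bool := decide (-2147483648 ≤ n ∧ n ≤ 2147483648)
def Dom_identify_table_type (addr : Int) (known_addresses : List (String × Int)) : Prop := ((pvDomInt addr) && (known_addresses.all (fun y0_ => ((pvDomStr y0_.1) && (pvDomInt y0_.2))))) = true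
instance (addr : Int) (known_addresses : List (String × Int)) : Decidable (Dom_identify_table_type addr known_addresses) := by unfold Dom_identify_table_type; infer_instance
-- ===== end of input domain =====

-- B merges A's two sequential dict scans into one pass (exact match returns at once,
-- first proximity hit is remembered for the fallback): simpler, same behaviour.

-- ===== PORT A =====
-- first loop of A: return name on exact match
def pvExactScan (addr : Int) : List (String × Int) → Option String
  | [] => none
  | (name, k) :: rest => if addr = k then some name else pvExactScan addr rest

-- second loop of A: return f"{name}_region" on |addr - k| < 16
def pvNearScan (addr : Int) : List (String × Int) → Option String
  | [] => none
  | (name, k) :: rest => if (addr - k).natAbs < 16 then some (name ++ "_region") else pvNearScan addr rest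

def identify_table_type (addr : Int) (known_addresses : List (String × Int)) : String :=
  match pvExactScan addr known_addresses with
  | some name => name
  | none =>
    match pvNearScan addr known_addresses with
    | some s => s
    | none => "unknown"

-- ===== PORT B =====
-- single pass with an Option accumulator for the first proximity candidate
def pvAltLoop (addr : Int) : List (String × Int) → Option String → String
  | [], some c => c ++ "_region"
  | [], none => "unknown"
  | (name, k) :: rest, cand =>
    if addr = k then name
    else pvAltLoop addr rest
      (if cand = none ∧ (addr - k).natAbs < 16 then some name else cand)

def identify_table_type_alt (addr : Int) (known_addresses : List (String × Int)) : String :=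
  pvAltLoop addr known_addresses none

-- ===== PRECONDITION & SPEC =====
def Spec_identify_table_type (addr : Int) (known_addresses : List (String × Int)) (out : String) : Prop := out = identify_table_type_alt addr known_addresses
instance (addr : Int) (known_addresses : List (String × Int)) (out : String) : Decidable (Spec_identify_table_type addr known_addresses out) := by unfold Spec_identify_table_type; infer_instance

-- ===== CLAIM (what is proved, stated in full; the proofs are below) =====
def Claim_equal_identify_table_type : Prop := ∀ (addr : Int) (known_addresses : List (String × Int)), Dom_identify_table_type addr known_addresses → Spec_identify_table_type addr known_addresses (identify_table_type addr known_addresses)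

-- ===== LEMMAS AND PROOFS =====

-- loop invariant: B's single pass equals "exact scan, else the recorded candidate, else near scan"
theorem pvAltLoop_eq (addr : Int) (l : List (String × Int)) (cand : Option String) :
    pvAltLoop addr l cand =
      match pvExactScan addr l with
      | some n => n
      | none =>
        match cand with
        | some c => c ++ "_region"
        | none =>
          match pvNearScan addr l with
          | some s => s
          | none => "unknown" := by
  induction l generalizing cand with
  | nil => cases cand <;> rfl
  | cons p rest ih =>
    obtain ⟨name, k⟩ := p
    simp only [pvAltLoop, pvExactScan, pvNearScan]
    by_cases h : addr = k
    · simp [h]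
    · simp only [if_neg h]
      rw [ih]
      cases cand with
      | some c => simp
      | none =>
        by_cases hn : (addr - k).natAbs < 16 <;> simp [hn]

-- ===== VERDICT (by name: the statement is the Claim_ definition above) =====
theorem identify_table_type_spec : Claim_equal_identify_table_type := by
  intro addr ka _
  unfold Spec_identify_table_type identify_table_type identify_table_type_alt
  rw [pvAltLoop_eq]
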